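-- pv_equiv track=rewrite | github.com/olafur-andri/advent-of-code | 2023/day_1/p2.py | derive_digit_at_start_of
-- ===== SOURCE A (Python) =====
-- from types import MappingProxyType # immutable dict
--
-- ALPHA_TO_DIGIT = MappingProxyType({
--     "one": 1,
--     "two": 2,
--     "three": 3,
--     "four": 4,
--     "five": 5,
--     "six": 6,
--     "seven": 7,
--     "eight": 8,
--     "nine": 9,
-- })
--
-- class NoDigitFoundError(ValueError):
--     pass
--
-- def derive_digit_at_start_of(s: str):
--     """Tries to derive a digit from the given string, raises an error if none could be found"""
--     all_digit_names = tuple(ALPHA_TO_DIGIT.keys())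
--
--     if s[0].isdigit():
--         return int(s[0])
--
--     for digit_name in all_digit_names:
--         if s.startswith(digit_name):
--             return ALPHA_TO_DIGIT[digit_name]
--
--     raise NoDigitFoundError()
-- ===== SOURCE B (Python) =====
-- # B: instead of scanning the nine spelled-out digit names with startswith, try the
-- # three distinct name lengths (3, 4, 5) and look the fixed-length prefix slice up
-- # directly in the dictionary.
-- ALPHA_TO_DIGIT = {
--     "one": 1,
--     "two": 2,
--     "three": 3,
--     "four": 4,
--     "five": 5,
--     "six": 6,
--     "seven": 7,
--     "eight": 8,
--     "nine": 9,
-- }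
--
-- class NoDigitFoundError(ValueError):
--     pass
--
-- def derive_digit_at_start_of(s: str):
--     if s[0].isdigit():
--         return int(s[0])
--     for n in (3, 4, 5):
--         digit = ALPHA_TO_DIGIT.get(s[:n])
--         if digit is not None:
--             return digit
--     raise NoDigitFoundError()
-- ===== Notes on version B (the rewrite author's own statement) =====
-- stated objective: alternative
-- what changed: B replaces A's scan over the nine digit names with startswith by three fixed-length prefix slices (lengths 3, 4, 5) looked up directly in the dictionary.
import Mathlib
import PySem

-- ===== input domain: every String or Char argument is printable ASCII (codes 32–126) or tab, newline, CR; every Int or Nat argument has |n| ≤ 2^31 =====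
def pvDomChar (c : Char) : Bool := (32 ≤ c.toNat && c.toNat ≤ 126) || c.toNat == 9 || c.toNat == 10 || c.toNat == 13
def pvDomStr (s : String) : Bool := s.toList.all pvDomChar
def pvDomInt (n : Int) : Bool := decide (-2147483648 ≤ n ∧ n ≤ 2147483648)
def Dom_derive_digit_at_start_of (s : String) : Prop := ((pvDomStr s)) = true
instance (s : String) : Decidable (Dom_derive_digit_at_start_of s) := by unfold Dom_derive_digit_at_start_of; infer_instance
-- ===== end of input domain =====

-- B replaces A's startswith-scan over the nine digit names by three fixed-length
-- prefix slices looked up directly in the dictionary (alternative decomposition).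


-- ===== PORT A =====
-- module constant ALPHA_TO_DIGIT (str keys ported as their code-point lists)
def pvAlpha : PySem.Dict (List Char) Int := PySem.Dict.ofList
  [("one".toList, 1), ("two".toList, 2), ("three".toList, 3), ("four".toList, 4),
   ("five".toList, 5), ("six".toList, 6), ("seven".toList, 7), ("eight".toList, 8),
   ("nine".toList, 9)]

-- A's 'for digit_name in all_digit_names' loop
def pvALoop (t : List Char) : List (List Char) → Int
  | [] => 0  -- 'raise NoDigitFoundError()' (excluded by Pre_)
  | w :: ws => if PySem.Chars.startswith t w then PySem.Dict.getD pvAlpha w 0 else pvALoop t ws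

def derive_digit_at_start_of (s : String) : Int :=
  match PySem.Str.pyGet? s 0 with
  | none => 0  -- s[0] raises IndexError on the empty string (excluded by Pre_)
  | some c =>
    if PySem.Chars.strIsdigit [c] then (PySem.Int.ofChars? [c]).getD 0  -- int(s[0])
    else pvALoop s.toList (PySem.Dict.keys pvAlpha)

-- ===== PORT B =====
-- B's 'for n in (3, 4, 5)' loop: look the length-n prefix slice up in the dict
def pvBLoop (t : List Char) : List Nat → Int
  | [] => 0  -- 'raise NoDigitFoundError()' (excluded by Pre_)
  | n :: ns =>
    match PySem.Dict.get? pvAlpha (PySem.Chars.slice t none (some (n : Int))) with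
    | some d => d
    | none => pvBLoop t ns

def derive_digit_at_start_of_alt (s : String) : Int :=
  match PySem.Str.pyGet? s 0 with
  | none => 0  -- s[0] raises IndexError on the empty string (excluded by Pre_)
  | some c =>
    if PySem.Chars.strIsdigit [c] then (PySem.Int.ofChars? [c]).getD 0  -- int(s[0])
    else pvBLoop s.toList [3, 4, 5]

-- ===== PRECONDITION & SPEC =====
def pvWords : List (List Char) :=
  ["one".toList, "two".toList, "three".toList, "four".toList, "five".toList,
   "six".toList, "seven".toList, "eight".toList, "nine".toList]

-- Pre_ excludes exactly the inputs where A raises: the empty string (IndexError at s[0])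
-- and strings that neither start with an ASCII digit nor with a spelled-out digit name
-- (NoDigitFoundError).
def Pre_derive_digit_at_start_of (s : String) : Prop :=
  s.toList ≠ [] ∧
    (PySem.Chars.strIsdigit (s.toList.take 1) = true ∨ ∃ w ∈ pvWords, w <+: s.toList)
instance (s : String) : Decidable (Pre_derive_digit_at_start_of s) := by
  unfold Pre_derive_digit_at_start_of; infer_instance

def pvWitness_derive_digit_at_start_of : String := "two"

def Spec_derive_digit_at_start_of (s : String) (out : Int) : Prop :=
  out = derive_digit_at_start_of_alt s
instance (s : String) (out : Int) : Decidable (Spec_derive_digit_at_start_of s out) := by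
  unfold Spec_derive_digit_at_start_of; infer_instance

-- ===== CLAIM (what is proved, stated in full; the proofs are below) =====
def Claim_equal_derive_digit_at_start_of : Prop :=
  ∀ (s : String), Dom_derive_digit_at_start_of s → Pre_derive_digit_at_start_of s →
    Spec_derive_digit_at_start_of s (derive_digit_at_start_of s)

-- ===== LEMMAS AND PROOFS =====

-- a prefix-slice of t can only equal w if w is a prefix of t
theorem pvTake_ne (t w : List Char) (n : Nat) (hw : ¬ w <+: t) : t.take n ≠ w :=
  fun h => hw (h ▸ List.take_prefix n t)

-- a slice shorter than w never equals w
theorem pvTake_ne_len (t w : List Char) (n : Nat) (hw : n < w.length) : t.take n ≠ w := by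
  intro h
  have := congrArg List.length h
  simp [List.length_take] at this
  omega

-- two incomparable words cannot both be prefixes of t
theorem pvTake_ne_incomp (t wi wj : List Char) (n : Nat) (hi : wi <+: t)
    (h1 : ¬ wi <+: wj) (h2 : ¬ wj <+: wi) : t.take n ≠ wj := by
  intro h
  rcases List.prefix_or_prefix_of_prefix hi (h ▸ List.take_prefix n t) with hc | hc
  · exact h1 hc
  · exact h2 hc

theorem pvTake_eq {t w : List Char} (n : Nat) (h : w <+: t) (hl : w.length = n) :
    t.take n = w := by
  subst hl; exact (List.prefix_iff_eq_take.mp h).symm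

theorem pvGet?_take_none (t : List Char) (n : Nat)
    (h : ∀ w ∈ pvWords, t.take n ≠ w) : pvAlpha.get? (t.take n) = none := by
  refine (PySem.Dict.get?_eq_none_iff_not_mem_keys _ _).mpr fun hm => ?_
  rw [show PySem.Dict.keys pvAlpha = pvWords from by decide] at hm
  exact h _ hm rfl

theorem pvLoops_eq (t : List Char) :
    pvALoop t (PySem.Dict.keys pvAlpha) = pvBLoop t [3, 4, 5] := by
  rw [show PySem.Dict.keys pvAlpha = pvWords from by decide]
  by_cases h1 : "one".toList <+: t
  · simp only [pvWords, pvALoop, pvBLoop, PySem.Chars.slice_eq_listSlice,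
      PySem.List.slice_to_natCast, pvTake_eq (t := t) 3 h1 rfl,
      PySem.Chars.startswith_iff, h1, if_true]
    rfl
  by_cases h2 : "two".toList <+: t
  · simp only [pvWords, pvALoop, pvBLoop, PySem.Chars.slice_eq_listSlice,
      PySem.List.slice_to_natCast, pvTake_eq (t := t) 3 h2 rfl,
      PySem.Chars.startswith_iff, h1, h2]
    rfl
  by_cases h3 : "three".toList <+: t
  · have g3 := pvGet?_take_none t 3 (by
      intro w hw; fin_cases hw <;>
        first
          | exact pvTake_ne_len _ _ _ (by decide)
          | exact pvTake_ne_incomp _ _ _ _ h3 (by decide) (by decide))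
    have g4 := pvGet?_take_none t 4 (by
      intro w hw; fin_cases hw <;>
        first
          | exact pvTake_ne_len _ _ _ (by decide)
          | exact pvTake_ne_incomp _ _ _ _ h3 (by decide) (by decide))
    simp only [pvWords, pvALoop, pvBLoop, PySem.Chars.slice_eq_listSlice,
      PySem.List.slice_to_natCast, pvTake_eq (t := t) 5 h3 rfl, g3, g4,
      PySem.Chars.startswith_iff, h1, h2, h3]
    rfl
  by_cases h4 : "four".toList <+: t
  · have g3 := pvGet?_take_none t 3 (by
      intro w hw; fin_cases hw <;>
        first
          | exact pvTake_ne_len _ _ _ (by decide)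
          | exact pvTake_ne_incomp _ _ _ _ h4 (by decide) (by decide))
    simp only [pvWords, pvALoop, pvBLoop, PySem.Chars.slice_eq_listSlice,
      PySem.List.slice_to_natCast, pvTake_eq (t := t) 4 h4 rfl, g3,
      PySem.Chars.startswith_iff, h1, h2, h3, h4]
    rfl
  by_cases h5 : "five".toList <+: t
  · have g3 := pvGet?_take_none t 3 (by
      intro w hw; fin_cases hw <;>
        first
          | exact pvTake_ne_len _ _ _ (by decide)
          | exact pvTake_ne_incomp _ _ _ _ h5 (by decide) (by decide))
    simp only [pvWords, pvALoop, pvBLoop, PySem.Chars.slice_eq_listSlice,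
      PySem.List.slice_to_natCast, pvTake_eq (t := t) 4 h5 rfl, g3,
      PySem.Chars.startswith_iff, h1, h2, h3, h4, h5]
    rfl
  by_cases h6 : "six".toList <+: t
  · simp only [pvWords, pvALoop, pvBLoop, PySem.Chars.slice_eq_listSlice,
      PySem.List.slice_to_natCast, pvTake_eq (t := t) 3 h6 rfl,
      PySem.Chars.startswith_iff, h1, h2, h3, h4, h5, h6]
    rfl
  by_cases h7 : "seven".toList <+: t
  · have g3 := pvGet?_take_none t 3 (by
      intro w hw; fin_cases hw <;>
        first
          | exact pvTake_ne_len _ _ _ (by decide)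
          | exact pvTake_ne_incomp _ _ _ _ h7 (by decide) (by decide))
    have g4 := pvGet?_take_none t 4 (by
      intro w hw; fin_cases hw <;>
        first
          | exact pvTake_ne_len _ _ _ (by decide)
          | exact pvTake_ne_incomp _ _ _ _ h7 (by decide) (by decide))
    simp only [pvWords, pvALoop, pvBLoop, PySem.Chars.slice_eq_listSlice,
      PySem.List.slice_to_natCast, pvTake_eq (t := t) 5 h7 rfl, g3, g4,
      PySem.Chars.startswith_iff, h1, h2, h3, h4, h5, h6, h7]
    rfl
  by_cases h8 : "eight".toList <+: t
  · have g3 := pvGet?_take_none t 3 (by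
      intro w hw; fin_cases hw <;>
        first
          | exact pvTake_ne_len _ _ _ (by decide)
          | exact pvTake_ne_incomp _ _ _ _ h8 (by decide) (by decide))
    have g4 := pvGet?_take_none t 4 (by
      intro w hw; fin_cases hw <;>
        first
          | exact pvTake_ne_len _ _ _ (by decide)
          | exact pvTake_ne_incomp _ _ _ _ h8 (by decide) (by decide))
    simp only [pvWords, pvALoop, pvBLoop, PySem.Chars.slice_eq_listSlice,
      PySem.List.slice_to_natCast, pvTake_eq (t := t) 5 h8 rfl, g3, g4,
      PySem.Chars.startswith_iff, h1, h2, h3, h4, h5, h6, h7, h8]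
    rfl
  by_cases h9 : "nine".toList <+: t
  · have g3 := pvGet?_take_none t 3 (by
      intro w hw; fin_cases hw <;>
        first
          | exact pvTake_ne_len _ _ _ (by decide)
          | exact pvTake_ne_incomp _ _ _ _ h9 (by decide) (by decide))
    simp only [pvWords, pvALoop, pvBLoop, PySem.Chars.slice_eq_listSlice,
      PySem.List.slice_to_natCast, pvTake_eq (t := t) 4 h9 rfl, g3,
      PySem.Chars.startswith_iff, h1, h2, h3, h4, h5, h6, h7, h8, h9]
    rfl
  · have gnone : ∀ n : Nat, pvAlpha.get? (t.take n) = none := fun n =>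
      pvGet?_take_none t n (by
        intro w hw; fin_cases hw <;>
          first
            | exact pvTake_ne _ _ _ h1
            | exact pvTake_ne _ _ _ h2
            | exact pvTake_ne _ _ _ h3
            | exact pvTake_ne _ _ _ h4
            | exact pvTake_ne _ _ _ h5
            | exact pvTake_ne _ _ _ h6
            | exact pvTake_ne _ _ _ h7
            | exact pvTake_ne _ _ _ h8
            | exact pvTake_ne _ _ _ h9)
    simp only [pvWords, pvALoop, pvBLoop, PySem.Chars.slice_eq_listSlice,
      PySem.List.slice_to_natCast, gnone,
      PySem.Chars.startswith_iff, h1, h2, h3, h4, h5, h6, h7, h8, h9, if_false]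

-- ===== VERDICT (by name: the statement is the Claim_ definition above) =====
theorem derive_digit_at_start_of_spec : Claim_equal_derive_digit_at_start_of := by
  intro s _ _
  unfold Spec_derive_digit_at_start_of derive_digit_at_start_of derive_digit_at_start_of_alt
  cases PySem.Str.pyGet? s 0 with
  | none => rfl
  | some c =>
    by_cases hd : PySem.Chars.strIsdigit [c] = true
    · simp [hd]
    · simp [hd, pvLoops_eq]
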